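-- pv_equiv track=rewrite | github.com/motazsaad/language-modeling | prepare/numbers2words.py | space_bewtween_digit_nondigit
-- ===== SOURCE A (Python) =====
-- def space_bewtween_digit_nondigit(line):
--     clean_line = list()
--     if len(line)>0:
--         current=line[0]
--     clean_line.append(current)
--     prev2=""
--     for i in range(1,len(line)):
--         prev1=current
--         current=line[i]
--         if (prev2.isdigit() and prev1=="." and current.isdigit()) or (prev2.isdigit() and prev1=="," and current.isdigit()):
--             clean_line.pop()
--             clean_line.append(" فاصلة ")
--         if (prev1.isdigit() and not current.isdigit()) or (not prev1.isdigit() and current.isdigit()):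
--             clean_line.append(" ")
--         clean_line.append(current)
--         prev2=prev1
--     return ''.join(clean_line)
-- ===== SOURCE B (Python) =====
-- def space_bewtween_digit_nondigit(line):
--     # Single forward pass with lookahead instead of A's pop-and-replace with prev2 state.
--     out = [line[0]]
--     n = len(line)
--     for i in range(1, n):
--         if line[i - 1].isdigit() != line[i].isdigit():
--             out.append(" ")
--         if line[i] in ".," and line[i - 1].isdigit() and i + 1 < n and line[i + 1].isdigit():
--             out.append(" فاصلة ")
--         else:
--             out.append(line[i])
--     return ''.join(out)
-- ===== Notes on version B (the rewrite author's own statement) =====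
-- stated objective: simpler
-- what changed: Replaces A's backward pop-and-replace loop with prev2/prev1 state by a single forward pass that decides each character once using one-character lookahead, eliminating the retroactive list mutation.
import Mathlib
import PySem

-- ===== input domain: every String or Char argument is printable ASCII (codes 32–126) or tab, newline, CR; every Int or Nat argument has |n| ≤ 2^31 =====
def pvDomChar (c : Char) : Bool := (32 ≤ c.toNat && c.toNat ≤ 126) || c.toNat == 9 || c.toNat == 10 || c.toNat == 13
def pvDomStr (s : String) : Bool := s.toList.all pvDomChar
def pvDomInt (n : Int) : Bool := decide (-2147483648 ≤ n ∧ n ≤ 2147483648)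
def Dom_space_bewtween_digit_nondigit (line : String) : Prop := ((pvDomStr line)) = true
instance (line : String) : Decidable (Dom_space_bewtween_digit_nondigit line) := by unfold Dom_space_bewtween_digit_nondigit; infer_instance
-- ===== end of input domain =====

-- B replaces A's backward pop-and-replace loop (prev2 state) by a single forward pass
-- with one-character lookahead: simpler, same O(n) cost; return value only.


-- ===== PORT A =====
-- prev2 starts as the Python string "" (isdigit() = false); modelled as Option Char,
-- with none.isdigit = false — exact for A, which only ever stores "" or a 1-char string there.
def pvIsDigitO : Option Char → Bool
  | none => false
  | some c => c.isDigit

-- one iteration of A's loop; state = (clean_line, current, prev2)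
def pvStepA (st : List String × Char × Option Char) (c : Char) : List String × Char × Option Char :=
  let clean := st.1
  let prev1 := st.2.1
  let prev2 := st.2.2
  let current := c
  let clean :=
    if (pvIsDigitO prev2 && prev1 == '.' && current.isDigit) ||
       (pvIsDigitO prev2 && prev1 == ',' && current.isDigit) then
      clean.dropLast ++ [" فاصلة "]          -- clean_line.pop(); clean_line.append(" فاصلة ")
    else clean
  let clean :=
    if (prev1.isDigit && !current.isDigit) || (!prev1.isDigit && current.isDigit) then
      clean ++ [" "]
    else clean
  (clean ++ [String.singleton current], current, some prev1)

def pvRunA : List Char → String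
  | [] => ""          -- A raises UnboundLocalError here; excluded by Pre_
  | c0 :: rest =>
    String.join (rest.foldl pvStepA ([String.singleton c0], c0, none)).1

def space_bewtween_digit_nondigit (line : String) : String := pvRunA line.toList

-- ===== PORT B =====
-- forward pass: emit optional separating space, then either " فاصلة " (lookahead) or the char
def pvGoB (prev : Char) : List Char → List String
  | [] => []
  | c :: rest =>
    (if prev.isDigit != c.isDigit then [" "] else []) ++
    (if (c == '.' || c == ',') && prev.isDigit &&
        (match rest with | d :: _ => d.isDigit | [] => false) then
       [" فاصلة "]
     else [String.singleton c]) ++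
    pvGoB c rest

def pvRunB : List Char → String
  | [] => ""          -- B raises IndexError here; excluded by Pre_
  | c0 :: rest => String.join (String.singleton c0 :: pvGoB c0 rest)

def space_bewtween_digit_nondigit_alt (line : String) : String := pvRunB line.toList

-- ===== PRECONDITION & SPEC =====
-- Both programs raise on the empty string (A: UnboundLocalError, B: IndexError).
def Pre_space_bewtween_digit_nondigit (line : String) : Prop := line ≠ ""
instance (line : String) : Decidable (Pre_space_bewtween_digit_nondigit line) := by
  unfold Pre_space_bewtween_digit_nondigit; infer_instance
def pvWitness_space_bewtween_digit_nondigit : String := "1.2"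

def Spec_space_bewtween_digit_nondigit (line : String) (out : String) : Prop := out = space_bewtween_digit_nondigit_alt line
instance (line : String) (out : String) : Decidable (Spec_space_bewtween_digit_nondigit line out) := by unfold Spec_space_bewtween_digit_nondigit; infer_instance

-- ===== CLAIM (what is proved, stated in full; the proofs are below) =====
def Claim_equal_space_bewtween_digit_nondigit : Prop := ∀ (line : String), Dom_space_bewtween_digit_nondigit line → Pre_space_bewtween_digit_nondigit line → Spec_space_bewtween_digit_nondigit line (space_bewtween_digit_nondigit line)

-- ===== LEMMAS AND PROOFS =====

-- what A's retroactive pop ultimately emits for a character `cur` already appended,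
-- given the char before it (prev2) and the remaining input
def pvEmit (prev2 : Option Char) (cur : Char) (l : List Char) : String :=
  if (cur == '.' || cur == ',') && pvIsDigitO prev2 &&
     (match l with | d :: _ => d.isDigit | [] => false) then " فاصلة "
  else String.singleton cur

lemma pvFold_eq (l : List Char) (cur : Char) (prev2 : Option Char) (pref : List String) :
    (l.foldl pvStepA (pref ++ [String.singleton cur], cur, prev2)).1
      = pref ++ pvEmit prev2 cur l :: pvGoB cur l := by
  induction l generalizing cur prev2 pref with
  | nil =>
    simp [pvEmit, pvGoB]
  | cons c rest ih =>
    have hstep : pvStepA (pref ++ [String.singleton cur], cur, prev2) c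
        = (((if (cur == '.' || cur == ',') && pvIsDigitO prev2 && c.isDigit then
              pref ++ [" فاصلة "] else pref ++ [String.singleton cur]) ++
           (if cur.isDigit != c.isDigit then [" "] else [])) ++ [String.singleton c],
           c, some cur) := by
      simp only [pvStepA]
      cases hd2 : pvIsDigitO prev2 <;> cases hc : c.isDigit <;> cases hp : cur.isDigit <;>
        by_cases h1 : cur = '.' <;> by_cases h2 : cur = ',' <;>
        simp_all
    rw [List.foldl_cons, hstep, ih]
    simp only [pvGoB, pvEmit, pvIsDigitO]
    by_cases hrep : ((cur == '.' || cur == ',') && pvIsDigitO prev2 && c.isDigit) = true <;>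
      by_cases hsp : (cur.isDigit != c.isDigit) = true <;>
      split_ifs <;> simp_all

-- ===== VERDICT (by name: the statement is the Claim_ definition above) =====
theorem space_bewtween_digit_nondigit_spec : Claim_equal_space_bewtween_digit_nondigit := by
  intro line _ hpre
  unfold Spec_space_bewtween_digit_nondigit
  unfold space_bewtween_digit_nondigit space_bewtween_digit_nondigit_alt
  cases h : line.toList with
  | nil =>
    exact absurd (by simpa using congrArg String.ofList h) hpre
  | cons c0 rest =>
    simp only [pvRunA, pvRunB]
    have hf := pvFold_eq rest c0 none []
    simp only [List.nil_append] at hf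
    rw [hf]
    have : pvEmit none c0 rest = String.singleton c0 := by
      simp [pvEmit, pvIsDigitO]
    rw [this]
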